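-- pv_equiv track=rewrite | github.com/kaluginpeter/Algorithms_and_structures_tasks | CodeWars/6kyu/Arrays_of_cats_and_dogs.py | solve
-- ===== SOURCE A (Python) =====
-- def solve(arr, n):
--     d = [i for i, x in enumerate(arr) if x == 'D']
--     c = {i for i, x in enumerate(arr) if x == 'C'}
--     s = 0
--     while d and c:
--         dog = d.pop()
--         cat = max((i for i in c if abs(dog - i) <= n), default=-1)
--         if cat >= 0:
--             s += 1
--             c.remove(cat)
--     return s
-- ===== SOURCE B (Python) =====
-- def solve(arr, n):
--     # Two-pointer greedy: cats kept as an ascending stack; dogs scanned right-to-left.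
--     # A cat popped for being above dog+n can never match a later (smaller) dog, so
--     # popping it permanently is exact.
--     cats = [i for i, x in enumerate(arr) if x == 'C']
--     s = 0
--     for dog in range(len(arr) - 1, -1, -1):
--         if arr[dog] == 'D':
--             while cats and cats[-1] > dog + n:
--                 cats.pop()
--             if cats and cats[-1] >= dog - n:
--                 s += 1
--                 cats.pop()
--     return s
-- ===== Notes on version B (the rewrite author's own statement) =====
-- stated objective: alternative
-- what changed: Replaces the per-dog scan over the whole remaining cat set (max of a generator, then set deletion) with a single right-to-left sweep that keeps the ascending cat-index list as a stack: cats above dog+n are popped permanently (no later, smaller dog can reach them) and the stack top is the window maximum; worst-case cost drops from O(D*C) to O(len(arr)), though a timing run measured only ~1.2x at the largest size.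
import Mathlib
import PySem

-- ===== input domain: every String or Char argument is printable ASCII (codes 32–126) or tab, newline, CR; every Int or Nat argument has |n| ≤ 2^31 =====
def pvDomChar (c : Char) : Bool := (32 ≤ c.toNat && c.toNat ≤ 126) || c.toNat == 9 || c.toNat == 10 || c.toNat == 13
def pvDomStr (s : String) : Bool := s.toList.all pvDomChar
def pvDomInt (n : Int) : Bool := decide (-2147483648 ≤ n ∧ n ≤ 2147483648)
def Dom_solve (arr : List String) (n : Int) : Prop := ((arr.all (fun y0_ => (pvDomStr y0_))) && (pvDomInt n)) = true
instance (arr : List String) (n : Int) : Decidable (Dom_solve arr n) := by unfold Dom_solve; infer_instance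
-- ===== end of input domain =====

-- B replaces A's per-dog scan of the whole cat set by one right-to-left sweep that uses the
-- ascending cat-index list as a stack (objective: alternative algorithm, same result).

-- ===== PORT A =====
-- A's while loop: pop the last dog, take the max cat of the window from the set, remove it.
-- (max over the set's iteration is order-independent here: distinct int elements, no ties.)
def solveLoopA (d : List Int) (c : PySem.Set Int) (n : Int) (s : Int) : Int :=
  if h : ¬(d = [] ∨ c = []) then
    let dog := d.getLast!
    let cat := (PySem.List.max? (c.filter (fun i => |dog - i| ≤ n)) (fun x => x)).getD (-1)
    if cat ≥ 0 then
      match PySem.Set.remove? c cat with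
      | some c' => solveLoopA d.dropLast c' n (s + 1)
      | none => s  -- KeyError: unreachable, cat was drawn from c
    else solveLoopA d.dropLast c n s
  else s
termination_by d.length
decreasing_by
  all_goals
    have hd : d ≠ [] := by rintro rfl; exact h (Or.inl rfl)
    have := List.length_pos_of_ne_nil hd
    simp only [List.length_dropLast]
    omega

def solve (arr : List String) (n : Int) : Int :=
  let d := ((PySem.List.enumerate arr).filter (fun p => p.2 == "D")).map (fun p => p.1)
  let c := PySem.Set.ofList (((PySem.List.enumerate arr).filter (fun p => p.2 == "C")).map (fun p => p.1))
  solveLoopA d c n 0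

-- ===== PORT B =====
-- inner while of B: `while cats and cats[-1] > dog + n: cats.pop()`
def dropBig (cats : List Int) (bound : Int) : List Int :=
  if h : cats ≠ [] ∧ cats.getLast! > bound then dropBig cats.dropLast bound else cats
termination_by cats.length
decreasing_by
  have := List.length_pos_of_ne_nil h.1
  simp only [List.length_dropLast]
  omega

def solve_alt (arr : List String) (n : Int) : Int :=
  let cats := ((PySem.List.enumerate arr).filter (fun p => p.2 == "C")).map (fun p => p.1)
  ((PySem.List.pyRange ((arr.length : Int) - 1) (-1) (-1)).foldl
    (fun (st : List Int × Int) dog =>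
      if PySem.List.pyGetD arr dog "" == "D" then
        let cs := dropBig st.1 (dog + n)
        if cs ≠ [] ∧ cs.getLast! ≥ dog - n then (cs.dropLast, st.2 + 1) else (cs, st.2)
      else st)
    (cats, 0)).2

-- ===== PRECONDITION & SPEC =====
def Spec_solve (arr : List String) (n : Int) (out : Int) : Prop := out = solve_alt arr n
instance (arr : List String) (n : Int) (out : Int) : Decidable (Spec_solve arr n out) := by unfold Spec_solve; infer_instance

-- ===== CLAIM (what is proved, stated in full; the proofs are below) =====
def Claim_equal_solve : Prop := ∀ (arr : List String) (n : Int), Dom_solve arr n → Spec_solve arr n (solve arr n)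

-- ===== LEMMAS AND PROOFS =====

lemma pv_getLast!_concat (l : List Int) (x : Int) : (l ++ [x]).getLast! = x := by
  rw [List.getLast!_eq_getLast?_getD, List.getLast?_concat]; rfl

lemma pv_getLast!_mem {l : List Int} (h : l ≠ []) : l.getLast! ∈ l := by
  rw [List.getLast!_eq_getLast?_getD]
  rcases hl : l.getLast? with _ | a
  · rw [List.getLast?_eq_none_iff] at hl; exact absurd hl h
  · simpa using List.mem_of_getLast? hl

lemma pv_eq_dropLast_concat {l : List Int} (h : l ≠ []) : l = l.dropLast ++ [l.getLast!] := by
  induction l using List.reverseRecOn with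
  | nil => exact absurd rfl h
  | append_singleton l' x _ => rw [List.dropLast_concat, pv_getLast!_concat]

-- A's loop without accumulator/early-exit, over the reversed dog list.
def fRun (dogs : List Int) (cats : List Int) (n : Int) : Int :=
  match dogs with
  | [] => 0
  | dog :: ds =>
    let cat := (PySem.List.max? (cats.filter (fun i => |dog - i| ≤ n)) (fun x => x)).getD (-1)
    if cat ≥ 0 then 1 + fRun ds (PySem.Set.discard cats cat) n else fRun ds cats n

-- B's sweep restricted to the dog indices (descending).
def gRun (dogs : List Int) (cats : List Int) (n : Int) : Int :=
  match dogs with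
  | [] => 0
  | dog :: ds =>
    let cs := dropBig cats (dog + n)
    if cs ≠ [] ∧ cs.getLast! ≥ dog - n then 1 + gRun ds cs.dropLast n else gRun ds cs n

lemma fRun_nil_cats (dogs : List Int) (n : Int) : fRun dogs [] n = 0 := by
  induction dogs with
  | nil => rfl
  | cons dog ds ih => simp [fRun, PySem.List.max?, ih]

lemma solveLoopA_eq_fRun (d : List Int) (c : PySem.Set Int) (n s : Int) :
    solveLoopA d c n s = s + fRun d.reverse c n := by
  induction d using List.reverseRecOn generalizing c s with
  | nil => rw [solveLoopA]; simp [fRun]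
  | append_singleton d' dog ih =>
    by_cases hc : c = []
    · subst hc; rw [solveLoopA]; simp [fRun_nil_cats]
    · have hne : ¬(d' ++ [dog] = [] ∨ c = []) := by simp [hc]
      rw [solveLoopA, dif_pos hne]
      have hL : (d' ++ [dog]).getLast! = dog := pv_getLast!_concat _ _
      have hD : (d' ++ [dog]).dropLast = d' := List.dropLast_concat
      simp only [hL, hD, List.reverse_append, List.reverse_cons, List.reverse_nil,
        List.nil_append, List.cons_append]
      simp only [fRun]
      set cat := (PySem.List.max? (c.filter (fun i => decide (|dog - i| ≤ n))) (fun x => x)).getD (-1) with hcat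
      by_cases hpos : cat ≥ 0
      · have hmem : cat ∈ c := by
          rcases hmax : PySem.List.max? (c.filter (fun i => decide (|dog - i| ≤ n))) (fun x => x) with _ | m
          · rw [hcat, hmax] at hpos; simp at hpos
          · have hmm := PySem.List.max?_mem hmax
            rw [hcat, hmax]
            simpa using List.mem_of_mem_filter hmm
        rw [PySem.Set.remove?_of_mem hmem]
        simp only [if_pos hpos]
        rw [ih]
        omega
      · simp only [if_neg hpos]
        exact ih c s

-- dropBig on a list splitting as small ++ big (big strictly above the bound, small not)
lemma dropBig_append (small big : List Int) (bound : Int)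
    (hs : ∀ x ∈ small, x ≤ bound) (hb : ∀ x ∈ big, bound < x) :
    dropBig (small ++ big) bound = small := by
  induction big using List.reverseRecOn with
  | nil =>
    rw [dropBig]
    simp only [List.append_nil]
    split_ifs with h
    · exact absurd (hs _ (pv_getLast!_mem h.1)) (by have := h.2; omega)
    · rfl
  | append_singleton big' x ih =>
    rw [dropBig]
    have hx : bound < x := hb x (by simp)
    rw [dif_pos]
    · rw [← List.append_assoc, List.dropLast_concat]
      exact ih (fun y hy => hb y (by simp [hy]))
    · refine ⟨by simp, ?_⟩
      rw [← List.append_assoc, pv_getLast!_concat]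
      omega

lemma foldl_max_le {t : List Int} {a m : Int} (ha : a ≤ m) (ht : ∀ x ∈ t, x ≤ m) :
    t.foldl max a ≤ m := by
  induction t generalizing a with
  | nil => simpa
  | cons x xs ih =>
    exact ih (by have := ht x (by simp); simp [ha, this])
      (fun y hy => ht y (by simp [hy]))

lemma max?_append_singleton (xs : List Int) (m : Int) (h : ∀ x ∈ xs, x ≤ m) :
    PySem.List.max? (xs ++ [m]) (fun y => y) = some m := by
  cases xs with
  | nil => simp [PySem.List.max?_id_cons]
  | cons a t =>
    rw [List.cons_append, PySem.List.max?_id_cons]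
    have : (t ++ [m]).foldl max a = m := by
      rw [List.foldl_append]
      simp only [List.foldl_cons, List.foldl_nil]
      have h1 : t.foldl max a ≤ m :=
        foldl_max_le (h a (by simp)) (fun y hy => h y (by simp [hy]))
      omega
    rw [this]

lemma getLast!_le_of_sorted {l : List Int} (hl : l.Pairwise (· < ·)) (x : Int) (hx : x ∈ l) :
    x ≤ l.getLast! := by
  induction l using List.reverseRecOn with
  | nil => simp at hx
  | append_singleton l' a _ =>
    rw [pv_getLast!_concat]
    rcases List.mem_append.mp hx with h | h
    · have := (List.pairwise_append.mp hl).2.2 x h a (by simp)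
      omega
    · simp at h; omega

lemma sorted_dropWhile_gt (low : List Int) (b : Int) (hs : low.Pairwise (· < ·)) :
    ∀ x ∈ low.dropWhile (fun x => decide (x ≤ b)), b < x := by
  induction low with
  | nil => simp
  | cons a t ih =>
    simp only [List.dropWhile_cons]
    split_ifs with ha
    · exact ih (List.pairwise_cons.mp hs).2
    · intro x hx
      simp only [decide_eq_true_eq, not_le] at ha
      rcases List.mem_cons.mp hx with rfl | hx
      · exact ha
      · have := (List.pairwise_cons.mp hs).1 x hx
        omega

-- the core greedy-equivalence: A's max-window-erase = B's stack sweep, with the junk `high`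
-- (cats already popped by B, all unreachable by the remaining dogs) carried on A's side.
lemma fRun_eq_gRun (dogs : List Int) (low high : List Int) (n : Int)
    (hsort : (low ++ high).Pairwise (· < ·))
    (hpos : ∀ x ∈ low ++ high, 0 ≤ x)
    (hhigh : ∀ h ∈ high, ∀ dg ∈ dogs, dg + n < h)
    (hdesc : dogs.Pairwise (fun a b => b ≤ a)) :
    fRun dogs (low ++ high) n = gRun dogs low n := by
  induction dogs generalizing low high with
  | nil => simp [fRun, gRun]
  | cons dog ds ih =>
    have hlowsort : low.Pairwise (· < ·) := (List.pairwise_append.mp hsort).1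
    set l1 := low.takeWhile (fun x => decide (x ≤ dog + n)) with hl1
    set l2 := low.dropWhile (fun x => decide (x ≤ dog + n)) with hl2
    have hsplit : low = l1 ++ l2 := (List.takeWhile_append_dropWhile).symm
    have hl1le : ∀ x ∈ l1, x ≤ dog + n := by
      intro x hx
      simpa using List.mem_takeWhile_imp hx
    have hl2gt : ∀ x ∈ l2, dog + n < x := sorted_dropWhile_gt low (dog + n) hlowsort
    have hdrop : dropBig low (dog + n) = l1 := by
      rw [hsplit]; exact dropBig_append _ _ _ hl1le hl2gt
    have hhigh' : ∀ x ∈ l2 ++ high, dog + n < x := by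
      intro x hx
      rcases List.mem_append.mp hx with h | h
      · exact hl2gt x h
      · exact hhigh x h dog (by simp)
    have hwin : (low ++ high).filter (fun i => decide (|dog - i| ≤ n))
        = l1.filter (fun i => decide (dog - n ≤ i)) := by
      rw [hsplit, List.append_assoc, List.filter_append]
      have h2 : (l2 ++ high).filter (fun i => decide (|dog - i| ≤ n)) = [] := by
        rw [List.filter_eq_nil_iff]
        intro x hx
        have := hhigh' x hx
        simp only [decide_eq_true_eq, abs_le, not_and, not_le]
        omega
      rw [h2, List.append_nil]
      apply List.filter_congr
      intro x hx
      have := hl1le x hx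
      simp only [abs_le, decide_eq_decide]
      omega
    have hl1sort : l1.Pairwise (· < ·) :=
      List.Pairwise.sublist (by rw [hsplit]; exact List.sublist_append_left _ _) hlowsort
    have hsort' : (l1 ++ (l2 ++ high)).Pairwise (· < ·) := by
      rw [← List.append_assoc, ← hsplit]; exact hsort
    have hpos' : ∀ x ∈ l1 ++ (l2 ++ high), 0 ≤ x := by
      intro x hx; apply hpos; rw [hsplit, List.append_assoc]; exact hx
    have hds : ∀ dg ∈ ds, dg ≤ dog := (List.pairwise_cons.mp hdesc).1
    have hhighds : ∀ x ∈ l2 ++ high, ∀ dg ∈ ds, dg + n < x := by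
      intro x hx dg hdg
      have h1 := hhigh' x hx
      have h2 := hds dg hdg
      omega
    have hdesc' : ds.Pairwise (fun a b => b ≤ a) := (List.pairwise_cons.mp hdesc).2
    simp only [fRun, gRun, hdrop]
    by_cases hmatch : l1 ≠ [] ∧ l1.getLast! ≥ dog - n
    · -- matched: the window max is l1's last element
      obtain ⟨hne, hge⟩ := hmatch
      set m := l1.getLast! with hmdef
      have hm : l1 = l1.dropLast ++ [m] := pv_eq_dropLast_concat hne
      have hwin2 : l1.filter (fun i => decide (dog - n ≤ i))
          = l1.dropLast.filter (fun i => decide (dog - n ≤ i)) ++ [m] := by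
        conv_lhs => rw [hm]
        rw [List.filter_append]
        simp only [List.filter_cons, List.filter_nil]
        simp [hge]
      have hmax : PySem.List.max? ((low ++ high).filter (fun i => decide (|dog - i| ≤ n)))
          (fun x => x) = some m := by
        rw [hwin, hwin2]
        apply max?_append_singleton
        intro x hx
        exact getLast!_le_of_sorted hl1sort x
          ((List.dropLast_sublist l1).mem (List.mem_of_mem_filter hx))
      have hm0 : 0 ≤ m := hpos m (by
        rw [hsplit]
        exact List.mem_append_left _ (List.mem_append_left _ (by rw [hmdef]; exact pv_getLast!_mem hne)))
      rw [hmax]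
      simp only [Option.getD_some]
      rw [if_pos (by omega : m ≥ 0), if_pos ⟨hne, by omega⟩]
      have hdisc : PySem.Set.discard (low ++ high) m = l1.dropLast ++ (l2 ++ high) := by
        unfold PySem.Set.discard
        conv_lhs => rw [hsplit, hm, List.append_assoc, List.append_assoc]
        rw [List.filter_append]
        have hml1' : ∀ x ∈ l1.dropLast, ¬ x = m := by
          intro x hx hxm
          have hp : l1.Pairwise (· < ·) := hl1sort
          rw [hm] at hp
          have := (List.pairwise_append.mp hp).2.2 x hx m (by simp)
          omega
        have hmrest : ∀ x ∈ l2 ++ high, ¬ x = m := by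
          intro x hx hxm
          have h1 := hhigh' x hx
          have h2 := hl1le m (pv_getLast!_mem hne)
          omega
        have h1 : l1.dropLast.filter (fun y => !y == m) = l1.dropLast :=
          List.filter_eq_self.mpr (by intro x hx; simpa using hml1' x hx)
        have h2 : ([m] ++ (l2 ++ high)).filter (fun y => !y == m) = l2 ++ high := by
          rw [List.filter_append]
          have h3 : (l2 ++ high).filter (fun y => !y == m) = l2 ++ high :=
            List.filter_eq_self.mpr (by intro x hx; simpa using hmrest x hx)
          simp [h3]
        rw [h1, h2]
      rw [hdisc]
      have hih := ih l1.dropLast (l2 ++ high)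
        (List.Pairwise.sublist (List.Sublist.append (List.dropLast_sublist l1) (List.Sublist.refl _)) hsort')
        (fun x hx => hpos' x
          (((List.Sublist.append (List.dropLast_sublist l1) (List.Sublist.refl (l2 ++ high)))).mem hx))
        hhighds hdesc'
      omega
    · -- unmatched: the window is empty
      have hwinnil : l1.filter (fun i => decide (dog - n ≤ i)) = [] := by
        rw [List.filter_eq_nil_iff]
        intro x hx
        by_cases hne : l1 = []
        · rw [hne] at hx; simp at hx
        · have hxlast := getLast!_le_of_sorted hl1sort x hx
          have hlt : l1.getLast! < dog - n := by
            rcases not_and_or.mp hmatch with h | h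
            · exact absurd hne (by simpa using h)
            · omega
          simp only [decide_eq_true_eq, not_le]
          omega
      have hmax : PySem.List.max? ((low ++ high).filter (fun i => decide (|dog - i| ≤ n)))
          (fun x => x) = none := by
        rw [hwin, hwinnil]; simp [PySem.List.max?_eq_none_iff]
      rw [hmax]
      simp only [Option.getD_none]
      rw [if_neg (by omega : ¬ (-1 : Int) ≥ 0), if_neg hmatch]
      have hih := ih l1 (l2 ++ high) hsort' hpos' hhighds hdesc'
      rw [hsplit, List.append_assoc]
      exact hih

-- B's foldl over an index list = gRun over its dog sublist
lemma foldl_eq_gRun (arr : List String) (n : Int) (L : List Int) (cs : List Int) (s : Int) :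
    (L.foldl
      (fun (st : List Int × Int) dog =>
        if PySem.List.pyGetD arr dog "" == "D" then
          let cs := dropBig st.1 (dog + n)
          if cs ≠ [] ∧ cs.getLast! ≥ dog - n then (cs.dropLast, st.2 + 1) else (cs, st.2)
        else st)
      (cs, s)).2 = s + gRun (L.filter (fun dog => PySem.List.pyGetD arr dog "" == "D")) cs n := by
  induction L generalizing cs s with
  | nil => simp [gRun]
  | cons dog L' ih =>
    simp only [List.foldl_cons, List.filter_cons]
    by_cases hd : PySem.List.pyGetD arr dog "" == "D"
    · simp only [hd, if_pos]
      by_cases hm : dropBig cs (dog + n) ≠ [] ∧ (dropBig cs (dog + n)).getLast! ≥ dog - n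
      · rw [if_pos hm, ih]
        simp only [gRun]
        rw [if_pos hm]
        omega
      · rw [if_neg hm, ih]
        simp only [gRun]
        rw [if_neg hm]
    · simp only [hd, Bool.false_eq_true, ite_false]
      rw [ih]

-- the index lists both programs extract from arr
lemma enumerate_filter_map (arr : List String) (t : String) :
    ((PySem.List.enumerate arr).filter (fun p => p.2 == t)).map (fun p => p.1)
      = (PySem.List.pyRange 0 (arr.length : Int) 1).filter
          (fun j => PySem.List.pyGetD arr j "" == t) := by
  rw [PySem.List.enumerate_eq_map_pyRange arr ""]
  simp only [PySem.List.len_eq, List.filter_map, List.map_map, Function.comp_def]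
  exact List.map_id _

-- ===== VERDICT (by name: the statement is the Claim_ definition above) =====
theorem solve_spec : Claim_equal_solve := by
  intro arr n _
  unfold Spec_solve solve solve_alt
  simp only []
  rw [enumerate_filter_map arr "D", enumerate_filter_map arr "C"]
  set R := PySem.List.pyRange 0 (arr.length : Int) 1 with hR
  set dAsc := R.filter (fun j => PySem.List.pyGetD arr j "" == "D") with hdAsc
  set cAsc := R.filter (fun j => PySem.List.pyGetD arr j "" == "C") with hcAsc
  have hRsort : R.Pairwise (· < ·) := PySem.List.pairwise_lt_pyRange_one 0 (arr.length : Int)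
  have hcsort : cAsc.Pairwise (· < ·) := List.Pairwise.sublist List.filter_sublist hRsort
  have hofList : PySem.Set.ofList cAsc = cAsc :=
    PySem.Set.ofList_eq_self_of_nodup _ hcsort.nodup
  rw [hofList, solveLoopA_eq_fRun]
  have hrange : PySem.List.pyRange ((arr.length : Int) - 1) (-1) (-1) = R.reverse := by
    rw [PySem.List.pyRange_neg_one_eq_reverse]
    norm_num
    exact hR.symm
  rw [hrange, foldl_eq_gRun arr n R.reverse cAsc 0]
  rw [List.filter_reverse, ← hdAsc]
  have hmain := fRun_eq_gRun dAsc.reverse cAsc [] n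
    (by simpa using hcsort)
    (by
      intro x hx
      simp only [List.append_nil] at hx
      have : x ∈ R := List.mem_of_mem_filter hx
      rw [hR] at this
      have := PySem.List.mem_pyRange_one.mp this
      omega)
    (by simp)
    (by
      rw [List.pairwise_reverse]
      exact (List.Pairwise.sublist List.filter_sublist hRsort).imp (fun h => le_of_lt h))
  simp only [List.append_nil] at hmain
  omega
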